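-- pv_equiv track=rewrite | github.com/ttokunaga-ja/pageBench | 01_academic_papers/scripts/04_fill_evidence_page.py | build_candidate_queries
-- ===== SOURCE A (Python) =====
-- from typing import Dict, List, Optional
--
-- def build_candidate_queries(words: List[str], max_words: int, min_words: int) -> List[str]:
--     if not words:
--         return []
--
--     safe_max = max(1, min(max_words, len(words)))
--     safe_min = max(1, min(min_words, safe_max))
--
--     candidates: List[str] = []
--     for window_size in range(safe_max, safe_min - 1, -1):
--         for start_idx in range(0, len(words) - window_size + 1):
--             candidates.append(" ".join(words[start_idx : start_idx + window_size]))
--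
--     return candidates
-- ===== SOURCE B (Python) =====
-- from typing import List
--
-- def build_candidate_queries(words: List[str], max_words: int, min_words: int) -> List[str]:
--     if not words:
--         return []
--
--     safe_max = max(1, min(max_words, len(words)))
--     safe_min = max(1, min(min_words, safe_max))
--
--     # Join all words once; pos[i] is the character offset of word i inside master.
--     master = " ".join(words)
--     pos = [0]
--     t = 0
--     for w in words:
--         t += len(w) + 1
--         pos.append(t)
--
--     # Each window is a single slice of master (the -1 drops the separating space).
--     return [master[pos[s] : pos[s + w] - 1]
--             for w in range(safe_max, safe_min - 1, -1)
--             for s in range(len(words) - w + 1)]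
-- ===== Notes on version B (the rewrite author's own statement) =====
-- stated objective: alternative
-- what changed: B joins all words once into a master string and builds a prefix table of word-start character offsets, then produces each window by slicing the master string instead of re-joining each window's sublist.
import Mathlib
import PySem

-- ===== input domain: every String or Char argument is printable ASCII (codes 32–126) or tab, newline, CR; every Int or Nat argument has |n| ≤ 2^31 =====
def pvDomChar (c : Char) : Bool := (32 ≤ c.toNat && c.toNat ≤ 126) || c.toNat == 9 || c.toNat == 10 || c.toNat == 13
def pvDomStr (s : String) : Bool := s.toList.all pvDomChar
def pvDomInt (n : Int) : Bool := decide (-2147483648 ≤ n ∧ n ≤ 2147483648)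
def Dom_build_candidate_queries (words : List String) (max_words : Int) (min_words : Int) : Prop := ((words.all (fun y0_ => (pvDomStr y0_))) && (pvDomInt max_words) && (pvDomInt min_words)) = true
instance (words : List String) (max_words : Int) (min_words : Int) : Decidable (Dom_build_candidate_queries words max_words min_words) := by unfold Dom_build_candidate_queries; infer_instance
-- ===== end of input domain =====

-- B precomputes the joined master string and a prefix table of word offsets, then slices
-- master for each window instead of re-joining it (objective: alternative; same output).


-- ===== PORT A =====
def build_candidate_queries (words : List String) (max_words : Int) (min_words : Int) : List String :=
  if words = [] then []
  else
    let safe_max := max 1 (min max_words (words.length : Int))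
    let safe_min := max 1 (min min_words safe_max)
    (PySem.List.pyRange safe_max (safe_min - 1) (-1)).foldl (fun candidates window_size =>
      (PySem.List.pyRange 0 ((words.length : Int) - window_size + 1) 1).foldl (fun candidates start_idx =>
        candidates ++ [PySem.Str.join " " (PySem.List.slice words (some start_idx) (some (start_idx + window_size)))]) candidates) []

-- ===== PORT B =====
def build_candidate_queries_alt (words : List String) (max_words : Int) (min_words : Int) : List String :=
  if words = [] then []
  else
    let safe_max := max 1 (min max_words (words.length : Int))
    let safe_min := max 1 (min min_words safe_max)
    let master := PySem.Str.join " " words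
    -- pos/t loop: running character offsets of the word starts inside master
    let pt := words.foldl (fun (st : List Int × Int) w =>
      (st.1 ++ [st.2 + PySem.Str.len w + 1], st.2 + PySem.Str.len w + 1)) (([0] : List Int), (0 : Int))
    let pos := pt.1
    -- indices into pos are always in range here, so pyGetD's default is never used
    (PySem.List.pyRange safe_max (safe_min - 1) (-1)).flatMap (fun w =>
      (PySem.List.pyRange 0 ((words.length : Int) - w + 1) 1).map (fun s =>
        PySem.Str.slice master (some (PySem.List.pyGetD pos s 0))
          (some (PySem.List.pyGetD pos (s + w) 0 - 1))))

-- ===== PRECONDITION & SPEC =====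
def Spec_build_candidate_queries (words : List String) (max_words : Int) (min_words : Int) (out : List String) : Prop := out = build_candidate_queries_alt words max_words min_words
instance (words : List String) (max_words : Int) (min_words : Int) (out : List String) : Decidable (Spec_build_candidate_queries words max_words min_words out) := by unfold Spec_build_candidate_queries; infer_instance

-- ===== CLAIM (what is proved, stated in full; the proofs are below) =====
def Claim_equal_build_candidate_queries : Prop := ∀ (words : List String) (max_words : Int) (min_words : Int), Dom_build_candidate_queries words max_words min_words → Spec_build_candidate_queries words max_words min_words (build_candidate_queries words max_words min_words)

-- ===== LEMMAS AND PROOFS =====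

/-- character offset of the `s`-th word start inside the space-joined string -/
def pvOff (ws : List (List Char)) (s : Nat) : Nat :=
  ((ws.take s).map (fun w => w.length + 1)).sum

/-- the tail of B's `pos` table, starting from running total `t` -/
def pvPosT (ws : List String) (t : Int) : List Int :=
  match ws with
  | [] => []
  | w :: rest => (t + PySem.Str.len w + 1) :: pvPosT rest (t + PySem.Str.len w + 1)

theorem pvFold_fst (ws : List String) (p : List Int) (t : Int) :
    (ws.foldl (fun (st : List Int × Int) w =>
      (st.1 ++ [st.2 + PySem.Str.len w + 1], st.2 + PySem.Str.len w + 1)) (p, t)).1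
    = p ++ pvPosT ws t := by
  induction ws generalizing p t with
  | nil => simp [pvPosT]
  | cons w rest ih =>
    simp only [List.foldl_cons]
    rw [ih]
    simp [pvPosT]

theorem pvPos_getD (ws : List String) (t : Int) (i : Nat) (h : i ≤ ws.length) :
    ((t :: pvPosT ws t).getD i 0) = t + (pvOff (ws.map String.toList) i : Int) := by
  induction ws generalizing t i with
  | nil =>
    have hi : i = 0 := by simpa using h
    subst hi
    simp [pvOff]
  | cons w rest ih =>
    cases i with
    | zero => simp [pvOff]
    | succ j =>
      have hj : j ≤ rest.length := by simpa using h
      have hoff : pvOff ((w :: rest).map String.toList) (j + 1)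
          = (w.toList.length + 1) + pvOff (rest.map String.toList) j := by
        simp [pvOff, List.take_succ_cons]
      rw [List.getD_cons_succ,
          show pvPosT (w :: rest) t
            = (t + PySem.Str.len w + 1) :: pvPosT rest (t + PySem.Str.len w + 1) from rfl,
          ih (t + PySem.Str.len w + 1) j hj, hoff]
      simp [PySem.Str.len]
      ring

theorem pvOff_add (ws : List (List Char)) (s k : Nat) :
    pvOff ws (s + k) = pvOff ws s + pvOff (ws.drop s) k := by
  unfold pvOff
  rw [List.take_add, List.map_append, List.sum_append]

theorem pvOff_pos (w : List Char) (ws : List (List Char)) (k : Nat) (hk : 1 ≤ k) :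
    1 ≤ pvOff (w :: ws) k := by
  cases k with
  | zero => omega
  | succ j => simp [pvOff, List.take_succ_cons]; omega

theorem pvDrop_join (ws : List (List Char)) (s : Nat) (h : s < ws.length) :
    (PySem.Chars.join [' '] ws).drop (pvOff ws s) = PySem.Chars.join [' '] (ws.drop s) := by
  induction s generalizing ws with
  | zero => simp [pvOff]
  | succ j ih =>
    match ws with
    | [] => simp at h
    | x :: rest =>
      have hr : j < rest.length := by simpa using h
      match rest with
      | [] => simp at hr
      | y :: r' =>
        have hoff : pvOff (x :: y :: r') (j + 1) = (x ++ [' ']).length + pvOff (y :: r') j := by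
          simp [pvOff, List.take_succ_cons]
        rw [PySem.Chars.join_cons_cons, hoff, ← List.drop_drop, List.drop_left,
            List.drop_succ_cons]
        exact ih (y :: r') hr

theorem pvTake_join (ws : List (List Char)) (k : Nat) (hk : 1 ≤ k) (h : k ≤ ws.length) :
    (PySem.Chars.join [' '] ws).take (pvOff ws k - 1) = PySem.Chars.join [' '] (ws.take k) := by
  induction ws generalizing k with
  | nil => simp at h; omega
  | cons x rest ih =>
    match k, hk with
    | 1, _ =>
      have hoff : pvOff (x :: rest) 1 - 1 = x.length := by
        simp [pvOff, List.take_succ_cons]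
      rw [hoff]
      match rest with
      | [] => simp [PySem.Chars.join_singleton]
      | y :: r' =>
        rw [PySem.Chars.join_cons_cons, List.append_assoc, List.take_left]
        simp [PySem.Chars.join_singleton]
    | (m + 2), _ =>
      have hr : m + 1 ≤ rest.length := by simpa using h
      match rest with
      | [] => simp at hr
      | y :: r' =>
        have hpos : 1 ≤ pvOff (y :: r') (m + 1) := pvOff_pos y r' (m + 1) (by omega)
        have hoff : pvOff (x :: y :: r') (m + 2) - 1
            = (x ++ [' ']).length + (pvOff (y :: r') (m + 1) - 1) := by
          simp [pvOff, List.take_succ_cons]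
          omega
        rw [PySem.Chars.join_cons_cons, hoff, List.take_add, List.take_left, List.drop_left,
            ih (m + 1) (by omega) hr,
            show (x :: y :: r').take (m + 2) = x :: y :: r'.take m from by
              simp [List.take_succ_cons],
            show (y :: r').take (m + 1) = y :: r'.take m from by simp [List.take_succ_cons],
            PySem.Chars.join_cons_cons]

theorem pvWindow (words : List String) (s k : Nat) (hk : 1 ≤ k) (hsk : s + k ≤ words.length) :
    PySem.Str.slice (PySem.Str.join " " words)
        (some (pvOff (words.map String.toList) s : Int))
        (some ((pvOff (words.map String.toList) (s + k) : Int) - 1))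
      = PySem.Str.join " " (PySem.List.slice words (some (s : Int)) (some ((s : Int) + (k : Int)))) := by
  apply String.toList_inj.mp
  have hsep : (" " : String).toList = [' '] := rfl
  have hlen : (words.map String.toList).length = words.length := by simp
  have hoffs : pvOff (words.map String.toList) (s + k)
      = pvOff (words.map String.toList) s + pvOff ((words.map String.toList).drop s) k :=
    pvOff_add _ s k
  have hkle : k ≤ ((words.map String.toList).drop s).length := by
    simp [hlen]
    omega
  have hpos : 1 ≤ pvOff ((words.map String.toList).drop s) k := by
    match hd : (words.map String.toList).drop s with
    | [] => rw [hd] at hkle; simp at hkle; omega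
    | z :: zs => exact pvOff_pos z zs k hk
  have hb : ((pvOff (words.map String.toList) (s + k) : Int) - 1)
      = ((pvOff (words.map String.toList) (s + k) - 1 : Nat) : Int) := by
    omega
  have hmaster : (PySem.Str.join " " words).toList
      = PySem.Chars.join [' '] (words.map String.toList) := by
    rw [PySem.Str.toList_join, hsep]
  have hsl : s < (words.map String.toList).length := by omega
  have harith : pvOff (words.map String.toList) (s + k) - 1 - pvOff (words.map String.toList) s
      = pvOff ((words.map String.toList).drop s) k - 1 := by omega
  rw [PySem.Str.toList_slice, PySem.Chars.slice_eq_listSlice, hmaster, hb,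
      PySem.List.slice_natCast, pvDrop_join _ s hsl, harith,
      pvTake_join _ k hk hkle, PySem.Str.toList_join, hsep,
      PySem.List.slice_natCast_add]
  simp [List.map_take, List.map_drop]

theorem pvFlatMap_congr {α β : Type} (l : List α) (f g : α → List β)
    (h : ∀ x ∈ l, f x = g x) : l.flatMap f = l.flatMap g := by
  induction l with
  | nil => rfl
  | cons x xs ih =>
    simp only [List.flatMap_cons, h x (by simp)]
    rw [ih (fun y hy => h y (by simp [hy]))]

-- ===== VERDICT (by name: the statement is the Claim_ definition above) =====
theorem build_candidate_queries_spec : Claim_equal_build_candidate_queries := by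
  intro words max_words min_words _dom
  unfold Spec_build_candidate_queries build_candidate_queries build_candidate_queries_alt
  by_cases hw : words = []
  · simp [hw]
  · simp only [if_neg hw]
    have hn1 : 1 ≤ (words.length : Int) := by
      have : words.length ≠ 0 := by simpa [List.length_eq_zero_iff] using hw
      omega
    rw [pvFold_fst]
    rw [PySem.List.foldl_congr_mem' _ _
          (fun c w => c ++ (PySem.List.pyRange 0 ((words.length : Int) - w + 1) 1).map
            (fun s => PySem.Str.join " " (PySem.List.slice words (some s) (some (s + w))))) _
          (fun w _ acc => PySem.List.foldl_append_singleton_eq_map _ _ _),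
        PySem.List.foldl_append_eq_flatMap, List.nil_append]
    apply pvFlatMap_congr
    intro w hwmem
    have hwb : (max 1 (min min_words (max 1 (min max_words (words.length:Int)))) - 1) < w ∧
        w ≤ max 1 (min max_words (words.length:Int)) := by
      simpa using (PySem.List.mem_pyRange_neg_one.mp hwmem)
    have hw1 : 1 ≤ w := by omega
    have hwn : w ≤ (words.length : Int) := by
      have : max 1 (min max_words (words.length:Int)) ≤ (words.length:Int) := by omega
      omega
    obtain ⟨kk, hkk⟩ : ∃ kk : Nat, w = (kk : Int) := ⟨w.toNat, by omega⟩
    subst hkk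
    apply List.map_congr_left
    intro st hstmem
    have hstb : 0 ≤ st ∧ st < (words.length : Int) - kk + 1 := by
      simpa using (PySem.List.mem_pyRange_one.mp hstmem)
    obtain ⟨ss, hss⟩ : ∃ ss : Nat, st = (ss : Int) := ⟨st.toNat, by omega⟩
    subst hss
    have hk1 : 1 ≤ kk := by omega
    have hsk : ss + kk ≤ words.length := by omega
    simp only [List.singleton_append]
    rw [show ((ss:Int) + (kk:Int)) = ((ss + kk : Nat) : Int) by push_cast; ring]
    rw [PySem.List.pyGetD_natCast, PySem.List.pyGetD_natCast,
        pvPos_getD words 0 ss (by omega), pvPos_getD words 0 (ss + kk) (by omega)]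
    simp only [zero_add]
    rw [show ((ss + kk : Nat) : Int) = ((ss:Int) + (kk:Int)) by push_cast; ring]
    exact (pvWindow words ss kk hk1 hsk).symm
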